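-- pv_equiv track=rewrite | github.com/fernando9017/HTA-Reimbursement-Price | app/services/spain_aemps_hta.py | _best_positioning
-- ===== SOURCE A (Python) =====
-- POSITIONING_ORDER = [
--     "Favorable",
--     "Favorable with conditions (Condicionado)",
--     "Pending (Pendiente)",
--     "Unfavorable (No favorable)",
--     "Unfavorable (Desfavorable)",
-- ]
--
-- def _best_positioning(positionings: list[str]) -> str:
--     """Return the best (most favorable) positioning from a list."""
--     if not positionings:
--         return ""
--     best_idx = len(POSITIONING_ORDER)
--     best_val = ""
--     for p in positionings:
--         try:
--             idx = POSITIONING_ORDER.index(p)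
--         except ValueError:
--             idx = len(POSITIONING_ORDER)
--         if idx < best_idx:
--             best_idx = idx
--             best_val = p
--     return best_val
-- ===== SOURCE B (Python) =====
-- POSITIONING_ORDER = [
--     "Favorable",
--     "Favorable with conditions (Condicionado)",
--     "Pending (Pendiente)",
--     "Unfavorable (No favorable)",
--     "Unfavorable (Desfavorable)",
-- ]
--
-- def _best_positioning(positionings: list[str]) -> str:
--     """Return the best (most favorable) positioning from a list."""
--     present = set(positionings)
--     for p in POSITIONING_ORDER:
--         if p in present:
--             return p
--     return ""
-- ===== Notes on version B (the rewrite author's own statement) =====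
-- stated objective: idiomatic
-- what changed: B iterates over POSITIONING_ORDER in priority order and returns the first entry present in the input (via a set built once), instead of scanning the input while tracking a minimal POSITIONING_ORDER.index; the empty/no-match cases fall out as the final return ''.
import Mathlib
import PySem

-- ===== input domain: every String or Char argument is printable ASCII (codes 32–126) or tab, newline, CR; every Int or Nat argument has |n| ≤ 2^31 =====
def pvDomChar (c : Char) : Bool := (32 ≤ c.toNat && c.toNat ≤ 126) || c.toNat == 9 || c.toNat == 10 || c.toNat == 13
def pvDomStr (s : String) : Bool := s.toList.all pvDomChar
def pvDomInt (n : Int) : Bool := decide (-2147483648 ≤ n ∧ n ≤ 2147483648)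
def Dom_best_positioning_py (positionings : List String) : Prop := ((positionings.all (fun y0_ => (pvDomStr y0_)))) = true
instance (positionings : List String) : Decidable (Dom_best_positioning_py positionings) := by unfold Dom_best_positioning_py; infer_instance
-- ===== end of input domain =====

-- B walks POSITIONING_ORDER in priority order and returns the first entry present in the
-- input, instead of A's scan of the input tracking a minimal index (objective: idiomatic).

def pvORDER : List String :=
  ["Favorable",
   "Favorable with conditions (Condicionado)",
   "Pending (Pendiente)",
   "Unfavorable (No favorable)",
   "Unfavorable (Desfavorable)"]

-- ===== PORT A =====
-- one loop iteration of A: try POSITIONING_ORDER.index(p) (ValueError → len), keep the min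
def pvStepA (st : Nat × String) (p : String) : Nat × String :=
  let idx := (PySem.List.index? pvORDER p).getD pvORDER.length
  if idx < st.1 then (idx, p) else st

def best_positioning_py (positionings : List String) : String :=
  if positionings = [] then ""
  else (positionings.foldl pvStepA (pvORDER.length, "")).2

-- ===== PORT B =====
def best_positioning_py_alt (positionings : List String) : String :=
  (pvORDER.find? (fun o => positionings.contains o)).getD ""

-- ===== PRECONDITION & SPEC =====
def Spec_best_positioning_py (positionings : List String) (out : String) : Prop := out = best_positioning_py_alt positionings
instance (positionings : List String) (out : String) : Decidable (Spec_best_positioning_py positionings out) := by unfold Spec_best_positioning_py; infer_instance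

-- ===== CLAIM (what is proved, stated in full; the proofs are below) =====
def Claim_equal_best_positioning_py : Prop := ∀ (positionings : List String), Dom_best_positioning_py positionings → Spec_best_positioning_py positionings (best_positioning_py positionings)

-- ===== LEMMAS AND PROOFS =====

theorem pv_find?_congr {l : List String} {f g : String → Bool}
    (h : ∀ a ∈ l, f a = g a) : l.find? f = l.find? g := by
  induction l with
  | nil => rfl
  | cons x xs ih =>
    simp only [List.find?_cons, h x (List.mem_cons_self)]
    split <;> [skip; exact ih (fun a ha => h a (List.mem_cons_of_mem _ ha))]
    rfl

theorem pv_mem_take_ne {bi : Nat} {p o : String}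
    (hbound : ∀ j, j < bi → (hj : j < pvORDER.length) → pvORDER[j] ≠ p)
    (ho : o ∈ pvORDER.take bi) : o ≠ p := by
  obtain ⟨j, hj, hget⟩ := List.mem_iff_getElem.mp ho
  rw [List.length_take] at hj
  have hjl : j < pvORDER.length := by omega
  have hjb : j < bi := by omega
  have : pvORDER[j] = o := by simpa [List.getElem_take] using hget
  exact this ▸ hbound j hjb hjl

theorem pv_key (xs : List String) : ∀ (bi : Nat) (bv : String), bi ≤ pvORDER.length →
    (∀ (h : bi < pvORDER.length), pvORDER[bi] = bv) →
    (xs.foldl pvStepA (bi, bv)).2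
      = ((pvORDER.take bi).find? (fun o => xs.contains o)).getD bv := by
  induction xs with
  | nil =>
    intro bi bv _ _
    have hnone : (pvORDER.take bi).find? (fun o => ([] : List String).contains o) = none :=
      List.find?_eq_none.mpr (by intro o _; simp)
    rw [List.foldl_nil, hnone]
    rfl
  | cons p t ih =>
    intro bi bv hle hinv
    rw [List.foldl_cons]
    by_cases hid : (PySem.List.index? pvORDER p).getD pvORDER.length < bi
    · -- p improves the best index
      have hlt5 : (PySem.List.index? pvORDER p).getD pvORDER.length < pvORDER.length :=
        lt_of_lt_of_le hid hle
      cases h : PySem.List.index? pvORDER p with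
      | none => rw [h] at hlt5; simp at hlt5
      | some k =>
        rw [h, Option.getD_some] at hid
        obtain ⟨hklen, hgetk, hfirst⟩ := PySem.List.getElem_of_index?_eq_some h
        have hstep : pvStepA (bi, bv) p = (k, p) := by
          simp only [pvStepA, h, Option.getD_some, if_pos hid]
        rw [hstep, ih k p (le_of_lt hklen) (fun _ => hgetk)]
        have hsplit : pvORDER.take bi
            = pvORDER.take k ++ (p :: ((pvORDER.drop (k+1)).take (bi - k - 1))) := by
          have h1 : pvORDER.take bi = pvORDER.take k ++ (pvORDER.drop k).take (bi - k) := by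
            rw [← List.take_add]; congr 1; omega
          have h2 : pvORDER.drop k = pvORDER[k] :: pvORDER.drop (k+1) :=
            List.drop_eq_getElem_cons hklen
          rw [h1, h2, hgetk]
          have h3 : bi - k = (bi - k - 1) + 1 := by omega
          rw [h3, List.take_succ_cons]
          simp
        rw [hsplit, List.find?_append]
        have hcong : (pvORDER.take k).find? (fun o => (p :: t).contains o)
            = (pvORDER.take k).find? (fun o => t.contains o) :=
          pv_find?_congr (fun o ho => by
            have hne : o ≠ p := pv_mem_take_ne (fun j hj _ => hfirst j hj) ho
            simp [hne])
        have hhead : List.find? (fun o => (p :: t).contains o)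
            (p :: ((pvORDER.drop (k+1)).take (bi - k - 1))) = some p := by
          simp
        rw [hcong, hhead]
        cases hres : (pvORDER.take k).find? (fun o => t.contains o) <;>
          simp
    · -- p does not improve; the kept state is unchanged
      have hstep : pvStepA (bi, bv) p = (bi, bv) := by
        simp only [pvStepA]
        rw [if_neg hid]
      rw [hstep, ih bi bv hle hinv]
      congr 1
      apply pv_find?_congr
      intro o ho
      have hne : o ≠ p := by
        refine pv_mem_take_ne (fun j hj hjl => ?_) ho
        cases h : PySem.List.index? pvORDER p with
        | none =>
          have hnp : p ∉ pvORDER := by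
            rw [← PySem.List.index?_isSome_iff, h]; simp
          intro hc; exact hnp (hc ▸ List.getElem_mem hjl)
        | some k =>
          obtain ⟨hklen, hgetk2, hfirst⟩ := PySem.List.getElem_of_index?_eq_some h
          have hbk : bi ≤ k := by rw [h, Option.getD_some] at hid; omega
          exact hfirst j (by omega)
      simp [hne]

-- ===== VERDICT (by name: the statement is the Claim_ definition above) =====
theorem best_positioning_py_spec : Claim_equal_best_positioning_py := by
  intro xs _
  unfold Spec_best_positioning_py best_positioning_py best_positioning_py_alt
  by_cases h : xs = []
  · subst h; simp [pvORDER]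
  · rw [if_neg h, pv_key xs pvORDER.length "" le_rfl (by intro h; exact absurd h (lt_irrefl _)),
        List.take_length]
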